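-- pv_equiv track=rewrite | github.com/yhc-666/Causal-RM | tools/loader.py | inverse_stf_metrics
-- ===== SOURCE A (Python) =====
-- def inverse_stf_metrics(metrics, names):
--     new_metrics = {}
--     for key, value in metrics.items():
--         if key not in names:
--             continue
--         for k, v in value.items():
--             if k in new_metrics:
--                 new_metrics[k][key] = v
--             else:
--                 new_metrics[k] = {key: v}
--     return new_metrics
-- ===== SOURCE B (Python) =====
-- def inverse_stf_metrics(metrics, names):
--     selected = [(key, value) for key, value in metrics.items() if key in names]
--     columns = dict.fromkeys(k for _, value in selected for k in value)
--     return {k: {key: value[k] for key, value in selected if k in value} for k in columns}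
-- ===== Notes on version B (the rewrite author's own statement) =====
-- stated objective: idiomatic
-- what changed: Replaces the single interleaved pass that mutates a growing nested dict with a two-phase transpose: first gather the inner keys in first-encounter order via dict.fromkeys, then build the result as a per-column dict comprehension that rescans the filtered entries.
import Mathlib
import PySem

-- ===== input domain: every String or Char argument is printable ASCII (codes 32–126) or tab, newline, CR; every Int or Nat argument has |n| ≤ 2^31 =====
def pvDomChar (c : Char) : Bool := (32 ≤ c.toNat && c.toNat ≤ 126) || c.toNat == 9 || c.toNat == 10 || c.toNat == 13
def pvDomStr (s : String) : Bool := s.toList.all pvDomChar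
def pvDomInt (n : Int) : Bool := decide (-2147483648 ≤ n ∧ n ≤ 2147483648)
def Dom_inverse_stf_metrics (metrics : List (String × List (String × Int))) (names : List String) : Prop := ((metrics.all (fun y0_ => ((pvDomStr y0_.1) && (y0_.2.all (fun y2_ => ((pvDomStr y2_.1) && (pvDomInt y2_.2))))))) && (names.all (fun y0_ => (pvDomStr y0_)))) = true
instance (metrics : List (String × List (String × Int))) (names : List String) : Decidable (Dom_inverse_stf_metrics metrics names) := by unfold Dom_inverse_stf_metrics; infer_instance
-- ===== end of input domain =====

-- B is an idiomatic two-phase transpose (collect columns, then per-column comprehension)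
-- instead of A's single interleaved pass mutating a nested dict; equivalence proved on
-- association lists without duplicate keys (the ones that represent Python dicts).

-- ===== PORT A =====
-- dict lookup (first match) and dict assignment d[k] = v (overwrite in place, else append),
-- exact Python dict semantics on association lists.
def dictGet? {α : Type} (d : List (String × α)) (k : String) : Option α :=
  match d with
  | [] => none
  | (k', v') :: rest => if k' = k then some v' else dictGet? rest k

def dictSet {α : Type} (d : List (String × α)) (k : String) (v : α) : List (String × α) :=
  match d with
  | [] => [(k, v)]
  | (k', v') :: rest => if k' = k then (k, v) :: rest else (k', v') :: dictSet rest k v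

def inverse_stf_metrics (metrics : List (String × List (String × Int))) (names : List String) : List (String × List (String × Int)) :=
  metrics.foldl
    (fun nm kv =>
      if kv.1 ∈ names then
        kv.2.foldl
          (fun nm p =>
            match dictGet? nm p.1 with
            | some inner => dictSet nm p.1 (dictSet inner kv.1 p.2)
            | none => dictSet nm p.1 [(kv.1, p.2)])
          nm
      else nm)
    []

-- ===== PORT B =====
def inverse_stf_metrics_alt (metrics : List (String × List (String × Int))) (names : List String) : List (String × List (String × Int)) :=
  let selected := metrics.filter (fun p => p.1 ∈ names)
  let columns := PySem.List.dedup (selected.flatMap (fun p => p.2.map Prod.fst))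
  columns.map (fun k => (k, selected.filterMap (fun p => (dictGet? p.2 k).map (fun v => (p.1, v)))))

-- ===== PRECONDITION & SPEC =====
-- Pre_ excludes association lists with duplicate keys (outer or inner): those do not
-- represent any Python dict, so A's behaviour on them is not defined by the source.
def Pre_inverse_stf_metrics (metrics : List (String × List (String × Int))) (names : List String) : Prop :=
  (metrics.map Prod.fst).Nodup ∧ ∀ p ∈ metrics, (p.2.map Prod.fst).Nodup

instance (metrics : List (String × List (String × Int))) (names : List String) : Decidable (Pre_inverse_stf_metrics metrics names) := by unfold Pre_inverse_stf_metrics; infer_instance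

def pvWitness_inverse_stf_metrics : (List (String × List (String × Int))) × List String :=
  ([("a", [("x", 1), ("y", 2)]), ("b", [("x", 3)])], ["a", "b"])

def Spec_inverse_stf_metrics (metrics : List (String × List (String × Int))) (names : List String) (out : List (String × List (String × Int))) : Prop := out = inverse_stf_metrics_alt metrics names
instance (metrics : List (String × List (String × Int))) (names : List String) (out : List (String × List (String × Int))) : Decidable (Spec_inverse_stf_metrics metrics names out) := by unfold Spec_inverse_stf_metrics; infer_instance

-- ===== CLAIM (what is proved, stated in full; the proofs are below) =====
def Claim_equal_inverse_stf_metrics : Prop := ∀ (metrics : List (String × List (String × Int))) (names : List String), Dom_inverse_stf_metrics metrics names → Pre_inverse_stf_metrics metrics names → Spec_inverse_stf_metrics metrics names (inverse_stf_metrics metrics names)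

-- ===== LEMMAS AND PROOFS =====

theorem foldl_if_filter {α β : Type} (P : α → Prop) [DecidablePred P] (f : β → α → β)
    (l : List α) (init : β) :
    l.foldl (fun acc a => if P a then f acc a else acc) init
      = (l.filter (fun a => P a)).foldl f init := by
  induction l generalizing init with
  | nil => rfl
  | cons a l ih =>
    by_cases h : P a <;> simp [h, ih]

-- the transpose of a list of selected entries, as B computes it
def pvRow (sel : List (String × List (String × Int))) (k : String) : List (String × Int) :=
  sel.filterMap (fun p => (dictGet? p.2 k).map (fun v => (p.1, v)))

def pvT (sel : List (String × List (String × Int))) : List (String × List (String × Int)) :=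
  (PySem.List.dedup (sel.flatMap (fun p => p.2.map Prod.fst))).map (fun k => (k, pvRow sel k))

theorem alt_eq_pvT (metrics : List (String × List (String × Int))) (names : List String) :
    inverse_stf_metrics_alt metrics names = pvT (metrics.filter (fun p => p.1 ∈ names)) := rfl

theorem dictGet?_eq_none_iff {α : Type} (d : List (String × α)) (k : String) :
    dictGet? d k = none ↔ k ∉ d.map Prod.fst := by
  induction d with
  | nil => simp [dictGet?]
  | cons hd tl ih =>
    obtain ⟨k', v'⟩ := hd
    by_cases h : k' = k <;> simp [dictGet?, h, ih, Ne.symm, eq_comm]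

theorem dictGet?_map (C : List String) (f : String → List (String × Int)) (k : String) :
    dictGet? (C.map (fun c => (c, f c))) k = if k ∈ C then some (f k) else none := by
  induction C with
  | nil => simp [dictGet?]
  | cons c C ih =>
    by_cases h : c = k
    · simp [dictGet?, h]
    · have h' : ¬ k = c := fun e => h e.symm
      simp [dictGet?, h, h', ih]

theorem dictSet_of_not_mem {α : Type} (d : List (String × α)) (k : String) (v : α)
    (h : k ∉ d.map Prod.fst) : dictSet d k v = d ++ [(k, v)] := by
  induction d with
  | nil => simp [dictSet]
  | cons hd tl ih =>
    obtain ⟨k', v'⟩ := hd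
    simp only [List.map_cons, List.mem_cons, not_or] at h
    simp [dictSet, Ne.symm h.1, ih h.2]

theorem dictSet_map (C : List String) (f : String → List (String × Int)) (k : String)
    (w : List (String × Int)) (hk : k ∈ C) (hnd : C.Nodup) :
    dictSet (C.map (fun c => (c, f c))) k w =
      C.map (fun c => (c, if c = k then w else f c)) := by
  induction C with
  | nil => simp at hk
  | cons c C ih =>
    simp only [List.nodup_cons] at hnd
    by_cases h : c = k
    · subst h
      have hmap : C.map (fun x => (x, if x = c then w else f x)) = C.map (fun x => (x, f x)) := by
        apply List.map_congr_left
        intro x hx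
        have hxc : x ≠ c := fun e => hnd.1 (e ▸ hx)
        simp [hxc]
      simp [dictSet, hmap]
    · simp only [List.mem_cons] at hk
      have hk' : k ∈ C := hk.resolve_left (fun e => h e.symm)
      simp [dictSet, h, ih hk' hnd.2]

theorem pvRow_append (s t : List (String × List (String × Int))) (k : String) :
    pvRow (s ++ t) k = pvRow s k ++ pvRow t k := by
  simp [pvRow, List.filterMap_append]

theorem pvRow_nil_of_not_mem (s : List (String × List (String × Int))) (k : String)
    (h : k ∉ s.flatMap (fun p => p.2.map Prod.fst)) : pvRow s k = [] := by
  induction s with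
  | nil => rfl
  | cons hd tl ih =>
    simp only [List.flatMap_cons, List.mem_append, not_or] at h
    have hg : dictGet? hd.2 k = none := (dictGet?_eq_none_iff _ _).2 h.1
    have : pvRow (hd :: tl) k = pvRow [hd] k ++ pvRow tl k := pvRow_append [hd] tl k
    rw [this, ih h.2]
    simp [pvRow, hg]

theorem mem_keys_pvRow (s : List (String × List (String × Int))) (k key : String)
    (h : key ∈ (pvRow s k).map Prod.fst) : key ∈ s.map Prod.fst := by
  induction s with
  | nil => simp [pvRow] at h
  | cons hd tl ih =>
    simp only [pvRow, List.filterMap_cons] at h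
    cases hg : dictGet? hd.2 k with
    | none => rw [hg] at h; simp only [Option.map_none] at h
              exact List.mem_cons_of_mem _ (ih h)
    | some v =>
      rw [hg] at h
      simp only [Option.map_some, List.map_cons, List.mem_cons] at h
      rcases h with h | h
      · simp [h]
      · exact List.mem_cons_of_mem _ (ih h)

theorem dictGet?_append {α : Type} (d e : List (String × α)) (k : String) :
    dictGet? (d ++ e) k =
      match dictGet? d k with
      | some v => some v
      | none => dictGet? e k := by
  induction d with
  | nil => simp [dictGet?]
  | cons hd tl ih =>
    obtain ⟨k', v'⟩ := hd
    by_cases h : k' = k <;> simp [dictGet?, h, ih]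

theorem dedup_append_singleton (xs : List String) (x : String) :
    PySem.List.dedup (xs ++ [x]) =
      if x ∈ xs then PySem.List.dedup xs else PySem.List.dedup xs ++ [x] := by
  simp only [PySem.List.dedup_eq_ofList, PySem.Set.ofList_eq_foldl, List.foldl_append,
    List.foldl_cons, List.foldl_nil]
  rw [← PySem.Set.ofList_eq_foldl]
  by_cases h : x ∈ xs
  · simp [PySem.Set.add, PySem.Set.contains, PySem.Set.mem_ofList, h]
  · simp [PySem.Set.add, PySem.Set.contains, PySem.Set.mem_ofList, h]

-- the single-entry step of A, one inner pair
def pvStep (key : String) (nm : List (String × List (String × Int)))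
    (p : String × Int) : List (String × List (String × Int)) :=
  match dictGet? nm p.1 with
  | some inner => dictSet nm p.1 (dictSet inner key p.2)
  | none => dictSet nm p.1 [(key, p.2)]

theorem pvT_snoc_nil (s : List (String × List (String × Int))) (key : String) :
    pvT (s ++ [(key, [])]) = pvT s := by
  simp [pvT, pvRow, dictGet?]

theorem pvStep_eq (s : List (String × List (String × Int))) (key : String)
    (vd : List (String × Int)) (k : String) (v : Int)
    (hkey : key ∉ s.map Prod.fst) (hk : k ∉ vd.map Prod.fst) :
    pvStep key (pvT (s ++ [(key, vd)])) (k, v) = pvT (s ++ [(key, vd ++ [(k, v)])]) := by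
  have hgvd : dictGet? vd k = none := (dictGet?_eq_none_iff _ _).2 hk
  -- the flattened key lists
  have hflat : (s ++ [(key, vd ++ [(k, v)])]).flatMap (fun p => p.2.map Prod.fst)
      = (s ++ [(key, vd)]).flatMap (fun p => p.2.map Prod.fst) ++ [k] := by
    simp
  -- rows of the extended list
  have hrow_ne : ∀ c, c ≠ k → pvRow (s ++ [(key, vd ++ [(k, v)])]) c = pvRow (s ++ [(key, vd)]) c := by
    intro c hc
    rw [pvRow_append, pvRow_append]
    congr 1
    have hck : ¬ k = c := fun e => hc e.symm
    cases hvd : dictGet? vd c <;> simp [pvRow, dictGet?_append, dictGet?, hvd, hck]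
  have hrow_u : pvRow (s ++ [(key, vd)]) k = pvRow s k := by
    rw [pvRow_append]; simp [pvRow, hgvd]
  have hrow_eq : pvRow (s ++ [(key, vd ++ [(k, v)])]) k = pvRow s k ++ [(key, v)] := by
    rw [pvRow_append]
    simp [pvRow, dictGet?_append, hgvd, dictGet?]
  set C := PySem.List.dedup ((s ++ [(key, vd)]).flatMap (fun p => p.2.map Prod.fst)) with hC
  have hndC : C.Nodup := PySem.List.nodup_dedup _
  by_cases hmem : k ∈ (s ++ [(key, vd)]).flatMap (fun p => p.2.map Prod.fst)
  · -- k already a column: lookup succeeds, inner dict is extended in place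
    have hkC : k ∈ C := by rw [hC, PySem.List.mem_dedup]; exact hmem
    have hget : dictGet? (pvT (s ++ [(key, vd)])) k = some (pvRow (s ++ [(key, vd)]) k) := by
      rw [pvT, ← hC, dictGet?_map, if_pos hkC]
    have hkeyrow : key ∉ (pvRow s k).map Prod.fst := fun hm => hkey (mem_keys_pvRow s k key hm)
    have hinner : dictSet (pvRow (s ++ [(key, vd)]) k) key v = pvRow s k ++ [(key, v)] := by
      rw [hrow_u, dictSet_of_not_mem _ _ _ hkeyrow]
    simp only [pvStep, hget]
    rw [hinner]
    have hLHS : dictSet (pvT (s ++ [(key, vd)])) k (pvRow s k ++ [(key, v)]) =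
        C.map (fun c => (c, if c = k then pvRow s k ++ [(key, v)] else pvRow (s ++ [(key, vd)]) c)) := by
      rw [pvT, ← hC]
      exact dictSet_map _ _ _ _ hkC hndC
    rw [hLHS, pvT, hflat, dedup_append_singleton, if_pos hmem, ← hC]
    apply List.map_congr_left
    intro c hc
    by_cases hck : c = k
    · subst hck; simp [hrow_eq]
    · simp [hck, hrow_ne c hck]
  · -- k is a new column: appended at the end
    have hkC : k ∉ C := by rw [hC, PySem.List.mem_dedup]; exact hmem
    have hget : dictGet? (pvT (s ++ [(key, vd)])) k = none := by
      rw [pvT, ← hC, dictGet?_map, if_neg hkC]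
    have hkeys : (pvT (s ++ [(key, vd)])).map Prod.fst = C := by
      rw [pvT, ← hC]; simp [Function.comp_def]
    have hrow_s : pvRow s k = [] := by
      apply pvRow_nil_of_not_mem
      intro hm
      exact hmem (by simp [hm])
    simp only [pvStep, hget]
    rw [dictSet_of_not_mem _ _ _ (by rw [hkeys]; exact hkC)]
    conv_rhs => rw [pvT, hflat, dedup_append_singleton]
    rw [if_neg hmem, ← hC, List.map_append]
    congr 1
    · rw [pvT, ← hC]
      apply List.map_congr_left
      intro c hc
      have hck : c ≠ k := fun e => hkC (e ▸ hc)
      simp [hrow_ne c hck]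
    · simp [hrow_eq, hrow_s]

theorem inner_loop (vtodo : List (String × Int)) :
    ∀ (vd : List (String × Int)) (s : List (String × List (String × Int))) (key : String),
      key ∉ s.map Prod.fst → ((vd ++ vtodo).map Prod.fst).Nodup →
      vtodo.foldl (pvStep key) (pvT (s ++ [(key, vd)])) = pvT (s ++ [(key, vd ++ vtodo)]) := by
  induction vtodo with
  | nil => intro vd s key _ _; simp
  | cons p rest ih =>
    intro vd s key hkey hnd
    obtain ⟨k, v⟩ := p
    have hk : k ∉ vd.map Prod.fst := by
      intro hmem
      have h2 := hnd
      simp only [List.map_append, List.map_cons, List.nodup_append] at h2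
      exact h2.2.2 k hmem k (by simp) rfl
    have hstep := pvStep_eq s key vd k v hkey hk
    have hnd' : ((vd ++ [(k, v)] ++ rest).map Prod.fst).Nodup := by
      simpa [List.append_assoc] using hnd
    calc ((k, v) :: rest).foldl (pvStep key) (pvT (s ++ [(key, vd)]))
        = rest.foldl (pvStep key) (pvStep key (pvT (s ++ [(key, vd)])) (k, v)) := rfl
      _ = rest.foldl (pvStep key) (pvT (s ++ [(key, vd ++ [(k, v)])])) := by rw [hstep]
      _ = pvT (s ++ [(key, vd ++ [(k, v)] ++ rest)]) := ih (vd ++ [(k, v)]) s key hkey hnd'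
      _ = pvT (s ++ [(key, vd ++ (k, v) :: rest)]) := by simp

theorem outer_loop (sel : List (String × List (String × Int))) :
    ∀ (s : List (String × List (String × Int))),
      ((s ++ sel).map Prod.fst).Nodup → (∀ p ∈ sel, (p.2.map Prod.fst).Nodup) →
      sel.foldl (fun nm kv => kv.2.foldl (pvStep kv.1) nm) (pvT s) = pvT (s ++ sel) := by
  induction sel with
  | nil => intro s _ _; simp
  | cons kv rest ih =>
    intro s hnd hin
    obtain ⟨key, value⟩ := kv
    have hkey : key ∉ s.map Prod.fst := by
      intro hmem
      have h2 := hnd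
      simp only [List.map_append, List.map_cons, List.nodup_append] at h2
      exact h2.2.2 key hmem key (by simp) rfl
    have hval : (value.map Prod.fst).Nodup := hin (key, value) (List.mem_cons_self ..)
    have h1 : value.foldl (pvStep key) (pvT s) = pvT (s ++ [(key, value)]) := by
      have := inner_loop value [] s key hkey (by simpa using hval)
      simpa [pvT_snoc_nil] using this
    have hnd' : ((s ++ [(key, value)] ++ rest).map Prod.fst).Nodup := by
      simpa [List.append_assoc] using hnd
    calc ((key, value) :: rest).foldl (fun nm kv => kv.2.foldl (pvStep kv.1) nm) (pvT s)
        = rest.foldl (fun nm kv => kv.2.foldl (pvStep kv.1) nm) (value.foldl (pvStep key) (pvT s)) := rfl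
      _ = rest.foldl (fun nm kv => kv.2.foldl (pvStep kv.1) nm) (pvT (s ++ [(key, value)])) := by rw [h1]
      _ = pvT (s ++ [(key, value)] ++ rest) := ih _ hnd' (fun p hp => hin p (List.mem_cons_of_mem _ hp))
      _ = pvT (s ++ (key, value) :: rest) := by simp

-- ===== VERDICT (by name: the statement is the Claim_ definition above) =====
theorem inverse_stf_metrics_spec : Claim_equal_inverse_stf_metrics := by
  intro metrics names _ hpre
  unfold Spec_inverse_stf_metrics
  rw [alt_eq_pvT]
  unfold inverse_stf_metrics
  have hnd : ((metrics.filter (fun p => p.1 ∈ names)).map Prod.fst).Nodup :=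
    hpre.1.sublist (List.Sublist.map _ List.filter_sublist)
  have hin : ∀ p ∈ metrics.filter (fun p => p.1 ∈ names), (p.2.map Prod.fst).Nodup :=
    fun p hp => hpre.2 p (List.mem_of_mem_filter hp)
  rw [foldl_if_filter]
  exact outer_loop (metrics.filter (fun p => p.1 ∈ names)) [] (by simpa using hnd) hin
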